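-- pv_equiv track=rewrite | github.com/jenz26/Chef_Generator | data_loaders.py | validate_ingredients_data
-- ===== SOURCE A (Python) =====
-- from typing import Dict, List, Any, Optional, Tuple
--
-- def validate_ingredients_data(data: List[Dict]) -> Tuple[bool, List[str]]:
--     """Validate ingredients data structure"""
--     warnings = []
--
--     if not isinstance(data, list):
--         return False, ["Ingredients data must be an array"]
--
--     if not data:
--         return False, ["Ingredients array is empty"]
--
--     for i, ingredient in enumerate(data):
--         if not isinstance(ingredient, dict):
--             return False, [f"Ingredient {i} is not an object"]
--
--         # Check name field
--         name_fields = ['name', 'Name']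
--         has_name = any(field in ingredient for field in name_fields)
--         if not has_name:
--             return False, [f"Ingredient {i} missing name field"]
--
--         ingredient_name = ingredient.get('name', ingredient.get('Name', f'Ingredient {i}'))
--
--         # Check optional but important fields
--         if 'tags' not in ingredient and 'Tags' not in ingredient:
--             warnings.append(f"Ingredient '{ingredient_name}': missing tags")
--
--         if 'flavor_values' not in ingredient and 'FlavorValues' not in ingredient:
--             warnings.append(f"Ingredient '{ingredient_name}': missing flavor values")
--
--         if 'quality_costs' not in ingredient and 'Qualities' not in ingredient:
--             warnings.append(f"Ingredient '{ingredient_name}': missing quality costs")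
--
--     return True, warnings
-- ===== SOURCE B (Python) =====
-- def validate_ingredients_data(data):
--     """Validate ingredients data structure (two-pass: validate first, then collect warnings)"""
--     if not isinstance(data, list):
--         return False, ["Ingredients data must be an array"]
--     if not data:
--         return False, ["Ingredients array is empty"]
--
--     # Pass 1: structural validation; stop at the first bad ingredient.
--     for i, ingredient in enumerate(data):
--         if not isinstance(ingredient, dict):
--             return False, [f"Ingredient {i} is not an object"]
--         if not any(field in ingredient for field in ('name', 'Name')):
--             return False, [f"Ingredient {i} missing name field"]
--
--     # Pass 2: everything is valid, collect warnings.
--     warnings = []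
--     for i, ingredient in enumerate(data):
--         name = ingredient.get('name', ingredient.get('Name', f'Ingredient {i}'))
--         for fields, label in ((('tags', 'Tags'), 'tags'),
--                               (('flavor_values', 'FlavorValues'), 'flavor values'),
--                               (('quality_costs', 'Qualities'), 'quality costs')):
--             if not any(f in ingredient for f in fields):
--                 warnings.append(f"Ingredient '{name}': missing {label}")
--     return True, warnings
-- ===== Notes on version B (the rewrite author's own statement) =====
-- stated objective: alternative
-- what changed: Single loop that interleaves validation with warning accumulation (discarding warnings on failure) is split into two passes: a validation pass that returns the first error, then a warning-collection pass driven by a field/label table, run only if validation succeeded.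
import Mathlib
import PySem

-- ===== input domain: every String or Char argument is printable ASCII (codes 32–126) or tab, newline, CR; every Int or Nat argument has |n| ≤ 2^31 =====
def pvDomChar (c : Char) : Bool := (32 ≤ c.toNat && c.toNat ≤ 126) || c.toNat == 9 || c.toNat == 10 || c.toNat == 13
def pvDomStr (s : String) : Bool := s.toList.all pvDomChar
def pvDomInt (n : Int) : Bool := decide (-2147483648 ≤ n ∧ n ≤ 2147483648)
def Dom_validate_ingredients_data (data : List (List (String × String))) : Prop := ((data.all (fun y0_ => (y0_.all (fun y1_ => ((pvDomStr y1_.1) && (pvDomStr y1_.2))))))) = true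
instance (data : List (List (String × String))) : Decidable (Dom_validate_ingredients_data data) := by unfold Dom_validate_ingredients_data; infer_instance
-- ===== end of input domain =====

-- B replaces A's single validate-and-warn loop by a validation pass followed by a table-driven
-- warning pass (alternative decomposition; same cost). Return values agree on every input.

-- ===== PORT A =====
-- 'k in ingredient' on the association-list dict
-- first-match lookup on the association-list dict (exact: keys are unique in a Python dict)
def pvGet? (ing : List (String × String)) (k : String) : Option String :=
  (ing.find? (fun kv => kv.1 == k)).map Prod.snd

def pvHasKey (ing : List (String × String)) (k : String) : Bool :=
  (pvGet? ing k).isSome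

-- ingredient.get('name', ingredient.get('Name', f'Ingredient {i}'))
def pvIngName (i : Int) (ing : List (String × String)) : String :=
  (pvGet? ing "name").getD ((pvGet? ing "Name").getD ("Ingredient " ++ PySem.Int.toStr i))

-- A's for-loop: carries index i and the warnings accumulated so far; early return on missing name
def pvLoopA (i : Int) (rest : List (List (String × String))) (warnings : List String) :
    Bool × List String :=
  match rest with
  | [] => (true, warnings)
  | ing :: rest' =>
    if !(pvHasKey ing "name" || pvHasKey ing "Name") then
      (false, ["Ingredient " ++ PySem.Int.toStr i ++ " missing name field"])
    else
      let n := pvIngName i ing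
      let w1 := if !pvHasKey ing "tags" && !pvHasKey ing "Tags" then
          warnings ++ ["Ingredient '" ++ n ++ "': missing tags"] else warnings
      let w2 := if !pvHasKey ing "flavor_values" && !pvHasKey ing "FlavorValues" then
          w1 ++ ["Ingredient '" ++ n ++ "': missing flavor values"] else w1
      let w3 := if !pvHasKey ing "quality_costs" && !pvHasKey ing "Qualities" then
          w2 ++ ["Ingredient '" ++ n ++ "': missing quality costs"] else w2
      pvLoopA (i + 1) rest' w3

def validate_ingredients_data (data : List (List (String × String))) : Bool × List String :=
  if data = [] then (false, ["Ingredients array is empty"])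
  else pvLoopA 0 data []

-- ===== PORT B =====
-- pass 1: first validation error, if any
def pvFirstErr (i : Int) : List (List (String × String)) → Option String
  | [] => none
  | ing :: rest =>
    if !(pvHasKey ing "name" || pvHasKey ing "Name") then
      some ("Ingredient " ++ PySem.Int.toStr i ++ " missing name field")
    else pvFirstErr (i + 1) rest

-- the (fields, label) table of Source B
def pvWarnTable : List ((String × String) × String) :=
  [(("tags", "Tags"), "tags"),
   (("flavor_values", "FlavorValues"), "flavor values"),
   (("quality_costs", "Qualities"), "quality costs")]

-- pass 2: table-driven warnings of one ingredient
def pvIngWarns (i : Int) (ing : List (String × String)) : List String :=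
  pvWarnTable.foldl (fun acc e =>
    if !(pvHasKey ing e.1.1 || pvHasKey ing e.1.2) then
      acc ++ ["Ingredient '" ++ pvIngName i ing ++ "': missing " ++ e.2]
    else acc) []

def pvAllWarns (i : Int) : List (List (String × String)) → List String
  | [] => []
  | ing :: rest => pvIngWarns i ing ++ pvAllWarns (i + 1) rest

def validate_ingredients_data_alt (data : List (List (String × String))) : Bool × List String :=
  if data = [] then (false, ["Ingredients array is empty"])
  else
    match pvFirstErr 0 data with
    | some msg => (false, [msg])
    | none => (true, pvAllWarns 0 data)

-- ===== PRECONDITION & SPEC =====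
def Spec_validate_ingredients_data (data : List (List (String × String))) (out : Bool × List String) : Prop := out = validate_ingredients_data_alt data
instance (data : List (List (String × String))) (out : Bool × List String) : Decidable (Spec_validate_ingredients_data data out) := by unfold Spec_validate_ingredients_data; infer_instance

-- ===== CLAIM (what is proved, stated in full; the proofs are below) =====
def Claim_equal_validate_ingredients_data : Prop := ∀ (data : List (List (String × String))), Dom_validate_ingredients_data data → Spec_validate_ingredients_data data (validate_ingredients_data data)

-- ===== LEMMAS AND PROOFS =====

-- A's loop equals: first error if any, else accumulated warnings plus B's second pass
theorem pvLoopA_eq (rest : List (List (String × String))) :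
    ∀ (i : Int) (ws : List String),
    pvLoopA i rest ws =
      match pvFirstErr i rest with
      | some msg => (false, [msg])
      | none => (true, ws ++ pvAllWarns i rest) := by
  induction rest with
  | nil => intro i ws; simp [pvLoopA, pvFirstErr, pvAllWarns]
  | cons ing rest' ih =>
    intro i ws
    simp only [pvLoopA, pvFirstErr, pvAllWarns]
    by_cases h : (pvHasKey ing "name" || pvHasKey ing "Name") = true
    · simp only [h, Bool.not_true, ih]
      cases pvFirstErr (i + 1) rest' with
      | some msg => simp
      | none =>
        simp only
        simp [pvIngWarns, pvWarnTable, List.foldl]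
        split_ifs <;> simp [String.append_assoc]
    · simp [h]

theorem validate_ingredients_data_spec : Claim_equal_validate_ingredients_data := by
  intro data _
  unfold Spec_validate_ingredients_data validate_ingredients_data validate_ingredients_data_alt
  by_cases h : data = []
  · simp [h]
  · simp only [h, reduceIte, pvLoopA_eq]
    cases pvFirstErr 0 data <;> simp
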